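-- pv_equiv track=rewrite | github.com/saptarshihalder/Dzukou-Pricing-2.0 | api/matching.py | extract_category_keywords
-- ===== SOURCE A (Python) =====
-- CATEGORY_KEYWORDS = {
--     "sunglasses": ["sunglass", "sunglasses", "eyewear", "shades", "glasses"],
--     "bottle": ["bottle", "bottles", "flask", "thermos", "canteen", "container"],
--     "notebook": ["notebook", "notebooks", "journal", "journals", "notepad", "notepads"],
--     "mug": ["mug", "mugs", "cup", "cups"],
--     "stand": ["stand", "holder", "dock"],
--     "lunchbox": ["lunchbox", "lunch box", "bento", "food container"],
--     "stole": ["stole", "stoles", "shawl", "shawls", "scarf", "scarves", "wrap"],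
--     "cushion": ["cushion", "cushions", "pillow", "pillows"],
--     "towel": ["towel", "towels"],
-- }
--
-- def extract_category_keywords(tokens: list[str]) -> set[str]:
--     """Extract category-related keywords from tokens"""
--     found = set()
--     for token in tokens:
--         for category, keywords in CATEGORY_KEYWORDS.items():
--             if token in keywords:
--                 found.add(category)
--                 found.update(keywords)
--     return found
-- ===== SOURCE B (Python) =====
-- # Precomputed keyword groups: each group is the category name followed by its keywords,
-- # and a reverse index from every keyword to its group (built once at import).
-- _GROUPS = [
--     ["sunglasses", "sunglass", "sunglasses", "eyewear", "shades", "glasses"],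
--     ["bottle", "bottle", "bottles", "flask", "thermos", "canteen", "container"],
--     ["notebook", "notebook", "notebooks", "journal", "journals", "notepad", "notepads"],
--     ["mug", "mug", "mugs", "cup", "cups"],
--     ["stand", "stand", "holder", "dock"],
--     ["lunchbox", "lunchbox", "lunch box", "bento", "food container"],
--     ["stole", "stole", "stoles", "shawl", "shawls", "scarf", "scarves", "wrap"],
--     ["cushion", "cushion", "cushions", "pillow", "pillows"],
--     ["towel", "towel", "towels"],
-- ]
--
-- _INDEX = {kw: g for g in _GROUPS for kw in g[1:]}
--
--
-- def extract_category_keywords(tokens: list[str]) -> set[str]: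
--     """Extract category-related keywords from tokens"""
--     matched = [_INDEX[t] for t in tokens if t in _INDEX]
--     found = set()
--     for group in matched:
--         found.update(group)
--     return found
-- ===== Notes on version B (the rewrite author's own statement) =====
-- stated objective: faster
-- what changed: Replaces A's nested per-token scan of all nine category lists with a staged pipeline: a precomputed keyword-to-group reverse index, a filter/map pass collecting the matched groups, then one union pass over those groups.
import Mathlib
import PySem

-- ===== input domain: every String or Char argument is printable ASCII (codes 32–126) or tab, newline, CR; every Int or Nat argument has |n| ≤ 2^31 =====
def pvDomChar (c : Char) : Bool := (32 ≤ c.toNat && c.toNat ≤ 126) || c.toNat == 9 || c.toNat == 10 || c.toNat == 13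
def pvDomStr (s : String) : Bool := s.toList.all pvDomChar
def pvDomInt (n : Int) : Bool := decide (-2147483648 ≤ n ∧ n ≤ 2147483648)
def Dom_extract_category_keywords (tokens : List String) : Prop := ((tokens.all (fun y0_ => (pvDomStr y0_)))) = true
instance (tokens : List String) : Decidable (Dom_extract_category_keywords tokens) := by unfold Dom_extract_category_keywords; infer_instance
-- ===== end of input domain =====

-- B replaces A's nested per-token scan over all nine category keyword lists with a staged
-- pipeline: a keyword→group reverse index built once, a filter/map pass collecting matched
-- groups, then one union pass; return value proved identical (same set, same insertion order).

-- ===== PORT A =====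
-- CATEGORY_KEYWORDS: module-level dict, iterated in insertion order
def CATEGORY_KEYWORDS : List (String × List String) :=
  [ ("sunglasses", ["sunglass", "sunglasses", "eyewear", "shades", "glasses"]),
    ("bottle", ["bottle", "bottles", "flask", "thermos", "canteen", "container"]),
    ("notebook", ["notebook", "notebooks", "journal", "journals", "notepad", "notepads"]),
    ("mug", ["mug", "mugs", "cup", "cups"]),
    ("stand", ["stand", "holder", "dock"]),
    ("lunchbox", ["lunchbox", "lunch box", "bento", "food container"]),
    ("stole", ["stole", "stoles", "shawl", "shawls", "scarf", "scarves", "wrap"]),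
    ("cushion", ["cushion", "cushions", "pillow", "pillows"]),
    ("towel", ["towel", "towels"]) ]

def extract_category_keywords (tokens : List String) : List String :=
  tokens.foldl (fun found token =>
    CATEGORY_KEYWORDS.foldl (fun found ck =>
      if token ∈ ck.2 then PySem.Set.update (PySem.Set.add found ck.1) ck.2 else found)
      found)
    PySem.Set.empty

-- ===== PORT B =====
-- _GROUPS: each group is the category name followed by its keywords (Source B literal)
def GROUPS : List (List String) :=
  [ ["sunglasses", "sunglass", "sunglasses", "eyewear", "shades", "glasses"],
    ["bottle", "bottle", "bottles", "flask", "thermos", "canteen", "container"],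
    ["notebook", "notebook", "notebooks", "journal", "journals", "notepad", "notepads"],
    ["mug", "mug", "mugs", "cup", "cups"],
    ["stand", "stand", "holder", "dock"],
    ["lunchbox", "lunchbox", "lunch box", "bento", "food container"],
    ["stole", "stole", "stoles", "shawl", "shawls", "scarf", "scarves", "wrap"],
    ["cushion", "cushion", "cushions", "pillow", "pillows"],
    ["towel", "towel", "towels"] ]

-- _INDEX = {kw: g for g in _GROUPS for kw in g[1:]}  (dict comprehension, built once)
def INDEX : PySem.Dict String (List String) :=
  PySem.Dict.ofList (GROUPS.flatMap (fun g => (g.drop 1).map (fun kw => (kw, g))))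

def extract_category_keywords_alt (tokens : List String) : List String :=
  (tokens.filterMap (fun t => PySem.Dict.get? INDEX t)).foldl
    (fun found group => PySem.Set.update found group) PySem.Set.empty

-- ===== PRECONDITION & SPEC =====
def Spec_extract_category_keywords (tokens : List String) (out : List String) : Prop := out = extract_category_keywords_alt tokens
instance (tokens : List String) (out : List String) : Decidable (Spec_extract_category_keywords tokens out) := by unfold Spec_extract_category_keywords; infer_instance

-- ===== CLAIM (what is proved, stated in full; the proofs are below) =====
def Claim_equal_extract_category_keywords : Prop := ∀ (tokens : List String), Dom_extract_category_keywords tokens → Spec_extract_category_keywords tokens (extract_category_keywords tokens)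

-- ===== LEMMAS AND PROOFS =====

set_option maxRecDepth 10000
set_option maxHeartbeats 2000000

-- all 41 keywords, first to last (proof-only helper, for the case split on the token)
def ALL_KEYWORDS : List String := ["sunglass", "sunglasses", "eyewear", "shades", "glasses", "bottle", "bottles", "flask", "thermos", "canteen", "container", "notebook", "notebooks", "journal", "journals", "notepad", "notepads", "mug", "mugs", "cup", "cups", "stand", "holder", "dock", "lunchbox", "lunch box", "bento", "food container", "stole", "stoles", "shawl", "shawls", "scarf", "scarves", "wrap", "cushion", "cushions", "pillow", "pillows", "towel", "towels"]

-- Per-token step functions agree: A's unbroken scan over the nine (disjoint) keyword lists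
-- fires on at most one category — exactly the group B's index returns for the token.
theorem step_eq (found : List String) (token : String) :
    CATEGORY_KEYWORDS.foldl (fun found ck =>
      if token ∈ ck.2 then PySem.Set.update (PySem.Set.add found ck.1) ck.2 else found) found
    = match PySem.Dict.get? INDEX token with
      | some group => PySem.Set.update found group
      | none => found := by
  rw [show INDEX = PySem.Dict.mk (GROUPS.flatMap (fun g => (g.drop 1).map (fun kw => (kw, g)))) from by decide]
  by_cases h : token ∈ ALL_KEYWORDS
  · simp only [ALL_KEYWORDS, List.mem_cons, List.not_mem_nil, or_false] at h
    rcases h with h|h|h|h|h|h|h|h|h|h|h|h|h|h|h|h|h|h|h|h|h|h|h|h|h|h|h|h|h|h|h|h|h|h|h|h|h|h|h|h|h <;> subst h <;> rfl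
  · simp only [ALL_KEYWORDS, List.mem_cons, List.not_mem_nil, or_false, not_or] at h
    obtain ⟨h1,h2,h3,h4,h5,h6,h7,h8,h9,h10,h11,h12,h13,h14,h15,h16,h17,h18,h19,h20,h21,h22,h23,h24,h25,h26,h27,h28,h29,h30,h31,h32,h33,h34,h35,h36,h37,h38,h39,h40,h41⟩ := h
    have e1 : _ = false := beq_eq_false_iff_ne.mpr (Ne.symm h1)
    have e2 : _ = false := beq_eq_false_iff_ne.mpr (Ne.symm h2)
    have e3 : _ = false := beq_eq_false_iff_ne.mpr (Ne.symm h3)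
    have e4 : _ = false := beq_eq_false_iff_ne.mpr (Ne.symm h4)
    have e5 : _ = false := beq_eq_false_iff_ne.mpr (Ne.symm h5)
    have e6 : _ = false := beq_eq_false_iff_ne.mpr (Ne.symm h6)
    have e7 : _ = false := beq_eq_false_iff_ne.mpr (Ne.symm h7)
    have e8 : _ = false := beq_eq_false_iff_ne.mpr (Ne.symm h8)
    have e9 : _ = false := beq_eq_false_iff_ne.mpr (Ne.symm h9)
    have e10 : _ = false := beq_eq_false_iff_ne.mpr (Ne.symm h10)
    have e11 : _ = false := beq_eq_false_iff_ne.mpr (Ne.symm h11)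
    have e12 : _ = false := beq_eq_false_iff_ne.mpr (Ne.symm h12)
    have e13 : _ = false := beq_eq_false_iff_ne.mpr (Ne.symm h13)
    have e14 : _ = false := beq_eq_false_iff_ne.mpr (Ne.symm h14)
    have e15 : _ = false := beq_eq_false_iff_ne.mpr (Ne.symm h15)
    have e16 : _ = false := beq_eq_false_iff_ne.mpr (Ne.symm h16)
    have e17 : _ = false := beq_eq_false_iff_ne.mpr (Ne.symm h17)
    have e18 : _ = false := beq_eq_false_iff_ne.mpr (Ne.symm h18)
    have e19 : _ = false := beq_eq_false_iff_ne.mpr (Ne.symm h19)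
    have e20 : _ = false := beq_eq_false_iff_ne.mpr (Ne.symm h20)
    have e21 : _ = false := beq_eq_false_iff_ne.mpr (Ne.symm h21)
    have e22 : _ = false := beq_eq_false_iff_ne.mpr (Ne.symm h22)
    have e23 : _ = false := beq_eq_false_iff_ne.mpr (Ne.symm h23)
    have e24 : _ = false := beq_eq_false_iff_ne.mpr (Ne.symm h24)
    have e25 : _ = false := beq_eq_false_iff_ne.mpr (Ne.symm h25)
    have e26 : _ = false := beq_eq_false_iff_ne.mpr (Ne.symm h26)
    have e27 : _ = false := beq_eq_false_iff_ne.mpr (Ne.symm h27)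
    have e28 : _ = false := beq_eq_false_iff_ne.mpr (Ne.symm h28)
    have e29 : _ = false := beq_eq_false_iff_ne.mpr (Ne.symm h29)
    have e30 : _ = false := beq_eq_false_iff_ne.mpr (Ne.symm h30)
    have e31 : _ = false := beq_eq_false_iff_ne.mpr (Ne.symm h31)
    have e32 : _ = false := beq_eq_false_iff_ne.mpr (Ne.symm h32)
    have e33 : _ = false := beq_eq_false_iff_ne.mpr (Ne.symm h33)
    have e34 : _ = false := beq_eq_false_iff_ne.mpr (Ne.symm h34)
    have e35 : _ = false := beq_eq_false_iff_ne.mpr (Ne.symm h35)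
    have e36 : _ = false := beq_eq_false_iff_ne.mpr (Ne.symm h36)
    have e37 : _ = false := beq_eq_false_iff_ne.mpr (Ne.symm h37)
    have e38 : _ = false := beq_eq_false_iff_ne.mpr (Ne.symm h38)
    have e39 : _ = false := beq_eq_false_iff_ne.mpr (Ne.symm h39)
    have e40 : _ = false := beq_eq_false_iff_ne.mpr (Ne.symm h40)
    have e41 : _ = false := beq_eq_false_iff_ne.mpr (Ne.symm h41)
    simp [CATEGORY_KEYWORDS, GROUPS, PySem.Dict.get?,
      h1,h2,h3,h4,h5,h6,h7,h8,h9,h10,h11,h12,h13,h14,h15,h16,h17,h18,h19,h20,h21,h22,h23,h24,h25,h26,h27,h28,h29,h30,h31,h32,h33,h34,h35,h36,h37,h38,h39,h40,h41,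
      e1,e2,e3,e4,e5,e6,e7,e8,e9,e10,e11,e12,e13,e14,e15,e16,e17,e18,e19,e20,e21,e22,e23,e24,e25,e26,e27,e28,e29,e30,e31,e32,e33,e34,e35,e36,e37,e38,e39,e40,e41]

-- folding over the filterMap of lookups = folding over tokens with the per-token match
theorem foldl_filterMap_get (tokens : List String) (found : List String) :
    (tokens.filterMap (fun t => PySem.Dict.get? INDEX t)).foldl
      (fun found group => PySem.Set.update found group) found
    = tokens.foldl (fun found token =>
        match PySem.Dict.get? INDEX token with
        | some group => PySem.Set.update found group
        | none => found) found := by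
  induction tokens generalizing found with
  | nil => rfl
  | cons t ts ih =>
    cases h : PySem.Dict.get? INDEX t with
    | none => simp [h, ih]
    | some g => simp [h, ih]

theorem foldl_step_eq (tokens : List String) (found : List String) :
    tokens.foldl (fun found token =>
      CATEGORY_KEYWORDS.foldl (fun found ck =>
        if token ∈ ck.2 then PySem.Set.update (PySem.Set.add found ck.1) ck.2 else found) found) found
    = tokens.foldl (fun found token =>
        match PySem.Dict.get? INDEX token with
        | some group => PySem.Set.update found group
        | none => found) found := by
  induction tokens generalizing found with
  | nil => rfl
  | cons t ts ih => rw [List.foldl_cons, List.foldl_cons, step_eq]; exact ih _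

-- ===== VERDICT (by name: the statement is the Claim_ definition above) =====
theorem extract_category_keywords_spec : Claim_equal_extract_category_keywords := by
  intro tokens _
  unfold Spec_extract_category_keywords extract_category_keywords extract_category_keywords_alt
  rw [foldl_filterMap_get]
  exact foldl_step_eq tokens PySem.Set.empty
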